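-- pv_equiv track=rewrite | github.com/DavidGugea/Data-Structures | Data structures ( code in python )/Linear Data Structures/Array ( Python Code )/Array_ArbitraryPrecisionIncrement.py | arbitraryPrecisionIncrement_tutorial
-- ===== SOURCE A (Python) =====
-- def arbitraryPrecisionIncrement_tutorial(A):
--     A[-1] += 1
--
--     for i in reversed(range(1, len(A))):
--         if A[i] != 10:
--             break
--
--         A[i] = 0
--         A[i - 1] += 1
--
--     if A[0] == 10:
--         A[0] = 1
--         A.append(0)
--
--     return A
-- ===== SOURCE B (Python) =====
-- # Equivalence is about the return value; like A, B also updates the list in place (A[:] = res).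
-- def arbitraryPrecisionIncrement_tutorial(A):
--     n = len(A)
--     k = 0
--     while k < n - 1 and A[n - 1 - k] == 9:
--         k += 1
--     d = A[n - 1 - k] + 1
--     res = A[:n - 1 - k] + [d] + [0] * k
--     if res[0] == 10:
--         res = [1] + res[1:] + [0]
--     A[:] = res
--     return A
-- ===== Notes on version B (the rewrite author's own statement) =====
-- stated objective: alternative
-- what changed: B replaces A's in-place backward carry loop (index-by-index mutation with break) by first measuring the trailing run of 9s, then rebuilding the result in one step from a slice, the bumped digit and a block of zeros.
import Mathlib
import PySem

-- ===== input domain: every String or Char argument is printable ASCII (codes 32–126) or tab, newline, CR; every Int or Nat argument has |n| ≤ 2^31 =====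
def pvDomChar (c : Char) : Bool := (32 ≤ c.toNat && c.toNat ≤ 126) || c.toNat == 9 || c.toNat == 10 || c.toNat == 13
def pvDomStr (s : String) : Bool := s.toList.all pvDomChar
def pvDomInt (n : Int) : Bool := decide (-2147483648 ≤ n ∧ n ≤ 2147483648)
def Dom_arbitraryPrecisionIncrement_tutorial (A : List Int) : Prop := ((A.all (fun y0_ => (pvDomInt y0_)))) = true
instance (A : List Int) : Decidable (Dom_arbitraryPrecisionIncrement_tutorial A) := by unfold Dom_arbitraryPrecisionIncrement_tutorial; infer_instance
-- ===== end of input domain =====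

-- B replaces A's in-place backward carry loop by measuring the trailing run of 9s and rebuilding
-- the list in one step (alternative decomposition, same O(n) cost). Both Pythons mutate the list
-- in place and return it; the equivalence proved here is about the returned value.

-- ===== PORT A =====

-- reversed(range(1, n+1... )) : aDownIdxs p = [p, p-1, ..., 1]; A uses aDownIdxs (len(A)-1)
def aDownIdxs : Nat → List Nat
  | 0 => []
  | p + 1 => (p + 1) :: aDownIdxs p

-- the for-loop with break: at index i, if A[i] != 10 break, else A[i] = 0; A[i-1] += 1.
-- All indices i are in 1..len(A)-1, so plain Nat indexing (getD/set/modify) is exact here.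
def aCarryLoop : List Int → List Nat → List Int
  | l, [] => l
  | l, i :: rest =>
    if l.getD i 0 ≠ 10 then l
    else aCarryLoop ((l.set i 0).modify (i - 1) (· + 1)) rest

def arbitraryPrecisionIncrement_tutorial (A : List Int) : List Int :=
  if A = [] then []  -- Python: A[-1] raises IndexError on []; excluded by Pre_
  else
    let n := A.length
    let A1 := A.set (n - 1) (A.getD (n - 1) 0 + 1)          -- A[-1] += 1
    let A2 := aCarryLoop A1 (aDownIdxs (n - 1))             -- for i in reversed(range(1, n)) …
    if A2.getD 0 0 = 10 then (A2.set 0 1) ++ [0] else A2    -- if A[0] == 10: A[0] = 1; A.append(0)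

-- ===== PORT B =====

-- the while loop: count of consecutive 9s scanning A[n-1], A[n-2], …, A[1]
def bChainLen : List Int → Nat
  | [] => 0
  | d :: rest => if d = 9 then bChainLen rest + 1 else 0

def arbitraryPrecisionIncrement_tutorial_alt (A : List Int) : List Int :=
  let n := A.length
  let k := bChainLen ((A.drop 1).reverse)                    -- scans A[n-1-k] for k = 0,1,… while == 9, capped at n-1
  let d := A.getD (n - 1 - k) 0 + 1                          -- d = A[n-1-k] + 1 (in range since A ≠ [], by Pre_)
  let res := A.take (n - 1 - k) ++ [d] ++ List.replicate k 0 -- res = A[:n-1-k] + [d] + [0]*k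
  if res.getD 0 0 = 10 then 1 :: (res.drop 1 ++ [0]) else res -- if res[0] == 10: res = [1] + res[1:] + [0]

-- ===== PRECONDITION & SPEC =====
-- Python A raises IndexError (A[-1]) on the empty list; B raises there too.
def Pre_arbitraryPrecisionIncrement_tutorial (A : List Int) : Prop := A ≠ []
instance (A : List Int) : Decidable (Pre_arbitraryPrecisionIncrement_tutorial A) := by unfold Pre_arbitraryPrecisionIncrement_tutorial; infer_instance
def pvWitness_arbitraryPrecisionIncrement_tutorial : List Int := [1, 9, 9]

def Spec_arbitraryPrecisionIncrement_tutorial (A : List Int) (out : List Int) : Prop := out = arbitraryPrecisionIncrement_tutorial_alt A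
instance (A : List Int) (out : List Int) : Decidable (Spec_arbitraryPrecisionIncrement_tutorial A out) := by unfold Spec_arbitraryPrecisionIncrement_tutorial; infer_instance

-- ===== CLAIM (what is proved, stated in full; the proofs are below) =====
def Claim_equal_arbitraryPrecisionIncrement_tutorial : Prop := ∀ (A : List Int), Dom_arbitraryPrecisionIncrement_tutorial A → Pre_arbitraryPrecisionIncrement_tutorial A → Spec_arbitraryPrecisionIncrement_tutorial A (arbitraryPrecisionIncrement_tutorial A)

-- ===== LEMMAS AND PROOFS =====

-- index-arithmetic helpers on appended lists
theorem pv_getD_app (u w : List Int) (i : Nat) (d : Int) :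
    (u ++ w).getD (u.length + i) d = w.getD i d := by
  induction u with
  | nil => simp
  | cons c u' ih => simpa [Nat.succ_add] using ih

theorem pv_set_app (u w : List Int) (i : Nat) (x : Int) :
    (u ++ w).set (u.length + i) x = u ++ w.set i x := by
  induction u with
  | nil => simp
  | cons c u' ih => simpa [Nat.succ_add] using ih

theorem pv_modify_app (u w : List Int) (i : Nat) (f : Int → Int) :
    (u ++ w).modify (u.length + i) f = u ++ w.modify i f := by
  induction u with
  | nil => simp
  | cons c u' ih => simpa [Nat.succ_add] using ih

-- the loop returns immediately when the checked cell is not 10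
theorem aCarryLoop_stop (l : List Int) (p : Nat) (h : l.getD p 0 ≠ 10) :
    aCarryLoop l (aDownIdxs p) = l := by
  cases p with
  | zero => simp [aDownIdxs, aCarryLoop]
  | succ q => show (if l.getD (q+1) 0 ≠ 10 then l else _) = l
              rw [if_pos h]

-- carry chain below a non-9 digit m: s pending 9s, the live 10, t zeros already produced
theorem aCarryLoop_chain (s : Nat) :
    ∀ (t : Nat) (u : List Int) (m : Int), m ≠ 9 →
      aCarryLoop (u ++ m :: (List.replicate s 9 ++ 10 :: List.replicate t 0))
          (aDownIdxs (u.length + 1 + s))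
        = u ++ (m + 1) :: List.replicate (s + t + 1) 0 := by
  induction s with
  | zero =>
    intro t u m hm
    have hsplit : u ++ m :: (List.replicate 0 9 ++ 10 :: List.replicate t 0)
        = (u ++ [m]) ++ (10 :: List.replicate t 0) := by simp
    rw [hsplit]
    have hidx : u.length + 1 + 0 = u.length + 1 := rfl
    rw [hidx, aDownIdxs]
    show (if ((u ++ [m]) ++ (10 :: List.replicate t 0)).getD (u.length + 1) 0 ≠ 10 then _
          else aCarryLoop _ (aDownIdxs u.length)) = _
    have hget : ((u ++ [m]) ++ (10 :: List.replicate t 0)).getD (u.length + 1) 0 = 10 := by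
      have h := pv_getD_app (u ++ [m]) (10 :: List.replicate t 0) 0 0
      simpa using h
    rw [if_neg (by rw [hget]; exact fun h => h rfl)]
    have hset : ((u ++ [m]) ++ (10 :: List.replicate t 0)).set (u.length + 1) 0
        = (u ++ [m]) ++ (0 :: List.replicate t 0) := by
      have h := pv_set_app (u ++ [m]) (10 :: List.replicate t 0) 0 0
      simpa using h
    rw [hset]
    have hmod : (((u ++ [m]) ++ (0 :: List.replicate t 0)).modify (u.length + 1 - 1) (· + 1))
        = u ++ (m + 1) :: 0 :: List.replicate t 0 := by
      have h := pv_modify_app u (m :: 0 :: List.replicate t 0) 0 (· + 1)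
      simpa using h
    rw [hmod]
    rw [aCarryLoop_stop _ u.length (by
      have h : (u ++ (m + 1) :: 0 :: List.replicate t 0).getD u.length 0 = m + 1 := by
        have h0 := pv_getD_app u ((m + 1) :: 0 :: List.replicate t 0) 0 0
        simpa using h0
      rw [h]
      intro hc
      exact hm (by omega))]
    simp [List.replicate_succ]
  | succ s ih =>
    intro t u m hm
    have hsplit : u ++ m :: (List.replicate (s + 1) 9 ++ 10 :: List.replicate t 0)
        = (u ++ m :: List.replicate (s + 1) 9) ++ (10 :: List.replicate t 0) := by simp
    rw [hsplit]
    have hidx : u.length + 1 + (s + 1) = (u.length + 1 + s) + 1 := rfl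
    rw [hidx, aDownIdxs]
    show (if ((u ++ m :: List.replicate (s + 1) 9) ++ (10 :: List.replicate t 0)).getD
              (u.length + 1 + s + 1) 0 ≠ 10 then _
          else aCarryLoop _ (aDownIdxs (u.length + 1 + s))) = _
    have hlen : (u ++ m :: List.replicate (s + 1) 9).length = u.length + 1 + s + 1 := by
      simp; omega
    have hget : ((u ++ m :: List.replicate (s + 1) 9) ++ (10 :: List.replicate t 0)).getD
        (u.length + 1 + s + 1) 0 = 10 := by
      have h := pv_getD_app (u ++ m :: List.replicate (s + 1) 9) (10 :: List.replicate t 0) 0 0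
      rw [hlen] at h
      simpa using h
    rw [if_neg (by rw [hget]; exact fun h => h rfl)]
    have hset : ((u ++ m :: List.replicate (s + 1) 9) ++ (10 :: List.replicate t 0)).set
        (u.length + 1 + s + 1) 0
        = (u ++ m :: List.replicate (s + 1) 9) ++ (0 :: List.replicate t 0) := by
      have h := pv_set_app (u ++ m :: List.replicate (s + 1) 9) (10 :: List.replicate t 0) 0 0
      rw [hlen] at h
      simpa using h
    rw [hset]
    have hsplit2 : (u ++ m :: List.replicate (s + 1) 9) ++ (0 :: List.replicate t 0)
        = (u ++ m :: List.replicate s 9) ++ (9 :: 0 :: List.replicate t 0) := by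
      rw [List.replicate_succ']
      simp
    have hlen2 : (u ++ m :: List.replicate s 9).length = u.length + 1 + s := by
      simp; omega
    have hmod : (((u ++ m :: List.replicate (s + 1) 9) ++ (0 :: List.replicate t 0)).modify
          (u.length + 1 + s + 1 - 1) (· + 1))
        = u ++ m :: (List.replicate s 9 ++ 10 :: List.replicate (t + 1) 0) := by
      rw [hsplit2]
      have h := pv_modify_app (u ++ m :: List.replicate s 9) (9 :: 0 :: List.replicate t 0) 0 (· + 1)
      rw [hlen2] at h
      simp at h
      simp only [List.append_assoc, List.cons_append, List.nil_append]
      rw [show u.length + 1 + s + 1 - 1 = u.length + 1 + s from rfl, h]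
      simp [List.replicate_succ]
    rw [hmod, ih (t + 1) u m hm]
    have : s + (t + 1) + 1 = s + 1 + t + 1 := by omega
    rw [this]

-- carry chain when every digit was 9: the 10 reaches position 0 (not processed by the loop)
theorem aCarryLoop_allNines (s : Nat) :
    ∀ t : Nat, aCarryLoop (List.replicate s 9 ++ 10 :: List.replicate t 0) (aDownIdxs s)
      = 10 :: List.replicate (s + t) 0 := by
  induction s with
  | zero => intro t; simp [aDownIdxs, aCarryLoop]
  | succ s ih =>
    intro t
    have hsplit : List.replicate (s + 1) 9 ++ 10 :: List.replicate t 0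
        = (List.replicate (s + 1) (9:Int)) ++ (10 :: List.replicate t 0) := rfl
    rw [aDownIdxs]
    show (if ((List.replicate (s + 1) (9:Int)) ++ (10 :: List.replicate t 0)).getD (s + 1) 0 ≠ 10
            then _ else aCarryLoop _ (aDownIdxs s)) = _
    have hget : ((List.replicate (s + 1) (9:Int)) ++ (10 :: List.replicate t 0)).getD (s + 1) 0 = 10 := by
      have h := pv_getD_app (List.replicate (s + 1) (9:Int)) (10 :: List.replicate t 0) 0 0
      simpa using h
    rw [if_neg (by rw [hget]; exact fun h => h rfl)]
    have hset : ((List.replicate (s + 1) (9:Int)) ++ (10 :: List.replicate t 0)).set (s + 1) 0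
        = (List.replicate (s + 1) (9:Int)) ++ (0 :: List.replicate t 0) := by
      have h := pv_set_app (List.replicate (s + 1) (9:Int)) (10 :: List.replicate t 0) 0 0
      simpa using h
    rw [hset]
    have hmod : (((List.replicate (s + 1) (9:Int)) ++ (0 :: List.replicate t 0)).modify
          (s + 1 - 1) (· + 1))
        = List.replicate s 9 ++ 10 :: List.replicate (t + 1) 0 := by
      rw [List.replicate_succ']
      have h := pv_modify_app (List.replicate s (9:Int)) (9 :: 0 :: List.replicate t 0) 0 (· + 1)
      simp at h
      simp only [List.append_assoc, List.cons_append, List.nil_append]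
      rw [show s + 1 - 1 = s from rfl]
      rw [h]
      simp [List.replicate_succ]
    rw [hmod, ih (t + 1)]
    have : s + (t + 1) = s + 1 + t := by omega
    rw [this]

-- every list is all nines, or a (possibly empty) prefix, a non-9 digit, and trailing nines
theorem pv_decomp (A : List Int) :
    A = List.replicate A.length 9 ∨
      ∃ (u : List Int) (m : Int) (j : Nat), m ≠ 9 ∧ A = u ++ m :: List.replicate j 9 := by
  induction A using List.reverseRecOn with
  | nil => left; rfl
  | append_singleton l a ih =>
    by_cases ha : a = 9
    · subst ha
      rcases ih with h | ⟨u, m, j, hm, hl⟩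
      · left
        rw [List.length_append, List.length_singleton]
        rw [List.replicate_succ']
        exact congrArg (· ++ [9]) h
      · right
        exact ⟨u, m, j + 1, hm, by rw [hl, List.replicate_succ']; simp⟩
    · right
      exact ⟨l, a, 0, ha, by simp⟩

theorem bChainLen_replicate (j : Nat) : bChainLen (List.replicate j 9) = j := by
  induction j with
  | zero => rfl
  | succ j ih => simp [List.replicate_succ, bChainLen, ih]

theorem bChainLen_stop (j : Nat) (m : Int) (w : List Int) (hm : m ≠ 9) :
    bChainLen (List.replicate j 9 ++ m :: w) = j := by
  induction j with
  | zero => simp [bChainLen, hm]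
  | succ j ih => simp [List.replicate_succ, bChainLen, ih]

theorem pv_take_app (u w : List Int) : (u ++ w).take u.length = u := by
  induction u with
  | nil => simp
  | cons c u' ih => simpa using ih

-- the two final steps agree on any nonempty list
theorem pv_final_eq (l : List Int) (hne : l ≠ []) :
    (if l.getD 0 0 = 10 then (l.set 0 1) ++ [0] else l)
    = (if l.getD 0 0 = 10 then 1 :: (l.drop 1 ++ [0]) else l) := by
  cases l with
  | nil => exact absurd rfl hne
  | cons x xs => split_ifs <;> simp

theorem main_eq (A : List Int) (hne : A ≠ []) :
    arbitraryPrecisionIncrement_tutorial A = arbitraryPrecisionIncrement_tutorial_alt A := by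
  rcases pv_decomp A with hA | ⟨u, m, j, hm, hA⟩
  · -- all-nines case
    obtain ⟨n', hn⟩ : ∃ n', A.length = n' + 1 := by
      cases A with
      | nil => exact absurd rfl hne
      | cons a l => exact ⟨l.length, by simp⟩
    rw [hn] at hA
    rw [hA]
    have hget_last : (List.replicate (n' + 1) (9:Int)).getD n' 0 = 9 := by
      rw [List.replicate_succ']
      have h := pv_getD_app (List.replicate n' (9:Int)) [9] 0 0
      simpa using h
    have hset : (List.replicate (n' + 1) (9:Int)).set n' (9 + 1)
        = List.replicate n' (9:Int) ++ 10 :: List.replicate 0 0 := by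
      rw [List.replicate_succ']
      have h := pv_set_app (List.replicate n' (9:Int)) [9] 0 10
      simpa using h
    unfold arbitraryPrecisionIncrement_tutorial arbitraryPrecisionIncrement_tutorial_alt
    rw [if_neg (by simp : ¬ (List.replicate (n' + 1) (9:Int) = []))]
    simp only [List.length_replicate, Nat.add_sub_cancel]
    rw [hget_last, hset, aCarryLoop_allNines n' 0]
    have hdrop : ((List.replicate (n' + 1) (9:Int)).drop 1).reverse = List.replicate n' 9 := by
      simp [List.replicate_succ]
    rw [hdrop, bChainLen_replicate n']
    simp only [Nat.sub_self, List.take_zero, List.nil_append]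
    have hget0 : (List.replicate (n' + 1) (9:Int)).getD 0 0 = 9 := by
      simp [List.replicate_succ]
    rw [hget0]
    norm_num
  · -- trailing-nines case: A = u ++ m :: 9^j with m ≠ 9
    have hlenA : A.length = u.length + 1 + j := by rw [hA]; simp; omega
    have hk : bChainLen ((A.drop 1).reverse) = j := by
      cases u with
      | nil =>
        rw [hA]
        simpa [List.reverse_replicate] using bChainLen_replicate j
      | cons c u' =>
        rw [hA]
        have hrev : (((c :: u') ++ m :: List.replicate j 9).drop 1).reverse
            = List.replicate j (9:Int) ++ m :: u'.reverse := by
          simp [List.reverse_replicate]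
        rw [hrev, bChainLen_stop j m u'.reverse hm]
    have hgetm : A.getD u.length 0 = m := by
      rw [hA]
      have h := pv_getD_app u (m :: List.replicate j 9) 0 0
      simpa using h
    have htake : A.take u.length = u := by
      rw [hA]; exact pv_take_app u _
    have hA2 : aCarryLoop (A.set (A.length - 1) (A.getD (A.length - 1) 0 + 1))
          (aDownIdxs (A.length - 1))
        = u ++ (m + 1) :: List.replicate j 0 := by
      cases j with
      | zero =>
        have hidx : A.length - 1 = u.length := by omega
        rw [hidx, hgetm]
        have hset : A.set u.length (m + 1) = u ++ (m + 1) :: List.replicate 0 9 := by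
          rw [hA]
          have h := pv_set_app u (m :: List.replicate 0 9) 0 (m + 1)
          simpa using h
        rw [hset]
        rw [aCarryLoop_stop _ u.length (by
          have h : (u ++ (m + 1) :: List.replicate 0 9).getD u.length 0 = m + 1 := by
            have h0 := pv_getD_app u ((m + 1) :: List.replicate 0 9) 0 0
            simpa using h0
          rw [h]
          intro hc
          exact hm (by omega))]
        simp
      | succ j' =>
        have hidx : A.length - 1 = u.length + 1 + j' := by omega
        have hApref : A = (u ++ m :: List.replicate j' 9) ++ (9 :: []) := by
          rw [hA, List.replicate_succ']
          simp
        have hlenpref : (u ++ m :: List.replicate j' 9).length = u.length + 1 + j' := by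
          simp; omega
        have hget : A.getD (A.length - 1) 0 = 9 := by
          rw [hidx, hApref]
          have h := pv_getD_app (u ++ m :: List.replicate j' 9) (9 :: []) 0 0
          rw [hlenpref] at h
          simpa using h
        have hset : A.set (A.length - 1) (9 + 1)
            = u ++ m :: (List.replicate j' 9 ++ 10 :: List.replicate 0 0) := by
          rw [hidx, hApref]
          have h := pv_set_app (u ++ m :: List.replicate j' 9) (9 :: []) 0 10
          rw [hlenpref] at h
          have h9 : (9 : Int) + 1 = 10 := by norm_num
          rw [h9]
          simp only [List.append_assoc, List.cons_append, List.nil_append] at h ⊢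
          simp at h
          simpa using h
        rw [hget, hset, hidx]
        have h := aCarryLoop_chain j' 0 u m hm
        rw [h]
    have hne2 : u ++ (m + 1) :: List.replicate j 0 ≠ [] := by simp
    have hidx2 : A.length - 1 - j = u.length := by omega
    unfold arbitraryPrecisionIncrement_tutorial arbitraryPrecisionIncrement_tutorial_alt
    rw [if_neg hne]
    simp only [hk, hidx2, hgetm, htake, hA2]
    have hres : u ++ [m + 1] ++ List.replicate j (0:Int) = u ++ (m + 1) :: List.replicate j 0 := by
      simp
    rw [hres]
    exact pv_final_eq _ hne2

-- ===== VERDICT (by name: the statement is the Claim_ definition above) =====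
theorem arbitraryPrecisionIncrement_tutorial_spec : Claim_equal_arbitraryPrecisionIncrement_tutorial := by
  intro A _hdom hpre
  unfold Spec_arbitraryPrecisionIncrement_tutorial
  exact main_eq A hpre
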